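-- pv_equiv track=rewrite | github.com/tsyu12345/Paiza-Python-SkillCheck | B081.py | cacl_rope_count
-- ===== SOURCE A (Python) =====
-- def cacl_rope_count(area_datas: list[list[str]], flower: str) -> int:
--
--     count: int = 0
--     for i, row in enumerate(area_datas):
--         for j, cell in enumerate(row):
--             if cell == flower: #花のあるマスに入ったら計算開始
--                 #４辺のマスに花が存在しているか確認し、必要なロープの数を計算する
--
--                 if i == 0 or area_datas[i-1][j] != flower: #上
--                     count += 1
--                 if i == len(area_datas)-1 or area_datas[i+1][j] != flower: #下
--                     count += 1
--                 if j == 0 or area_datas[i][j-1] != flower: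
--                     count += 1
--                 if j == len(row)-1 or area_datas[i][j+1] != flower:
--                     count += 1
--     return count
-- ===== SOURCE B (Python) =====
-- def cacl_rope_count(area_datas: list[list[str]], flower: str) -> int:
--     # 4*flowers - 2*(adjacent flower pairs): each flower cell needs 4 rope
--     # segments minus one for each side shared with another flower cell.
--     flowers = sum(cell == flower for row in area_datas for cell in row)
--     horiz = sum(a == flower and b == flower
--                 for row in area_datas
--                 for a, b in zip(row, row[1:]))
--     vert = sum(a == flower and b == flower
--                for r1, r2 in zip(area_datas, area_datas[1:])
--                for a, b in zip(r1, r2))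
--     return 4 * flowers - 2 * (horiz + vert)
-- ===== Notes on version B (the rewrite author's own statement) =====
-- stated objective: simpler
-- what changed: Replaces the per-cell four-boundary test against neighbours in all four directions by the closed count 4*flowers - 2*(adjacent flower pairs), computed with three zip/sum comprehensions and no index arithmetic.
import Mathlib
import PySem

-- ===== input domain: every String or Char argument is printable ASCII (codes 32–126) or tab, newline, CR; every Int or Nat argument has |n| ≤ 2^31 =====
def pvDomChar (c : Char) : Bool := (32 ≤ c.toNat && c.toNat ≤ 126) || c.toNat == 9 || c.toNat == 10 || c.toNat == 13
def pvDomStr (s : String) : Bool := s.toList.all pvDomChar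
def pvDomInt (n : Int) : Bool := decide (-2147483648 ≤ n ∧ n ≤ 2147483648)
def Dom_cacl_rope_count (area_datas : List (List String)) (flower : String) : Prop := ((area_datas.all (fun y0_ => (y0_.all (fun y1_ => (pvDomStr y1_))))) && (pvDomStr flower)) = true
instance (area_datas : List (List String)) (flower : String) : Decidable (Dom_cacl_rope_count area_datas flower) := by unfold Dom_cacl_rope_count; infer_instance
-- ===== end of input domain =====

-- B replaces A's per-cell four-boundary neighbour tests by the closed count
-- 4*flowers - 2*(adjacent flower pairs), computed with zip/sum passes (objective: simpler).

-- ===== PORT A =====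
-- literal port of A: nested enumerate loops, four guarded neighbour accesses
-- (each 'count += 1' is one '+ (if … then 1 else 0)'); unguarded neighbour
-- indexing area_datas[i±1][j] is pyGetD — Pre_ excludes the inputs where
-- Python would raise IndexError there.
def cacl_rope_count (area_datas : List (List String)) (flower : String) : Int :=
  (PySem.List.enumerate area_datas 0).foldl (fun count p =>
    (PySem.List.enumerate p.2 0).foldl (fun count q =>
      if q.2 = flower then
        count
          + (if p.1 = 0 ∨ PySem.List.pyGetD (PySem.List.pyGetD area_datas (p.1 - 1) []) q.1 "" ≠ flower then 1 else 0)
          + (if p.1 = (area_datas.length : Int) - 1 ∨ PySem.List.pyGetD (PySem.List.pyGetD area_datas (p.1 + 1) []) q.1 "" ≠ flower then 1 else 0)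
          + (if q.1 = 0 ∨ PySem.List.pyGetD (PySem.List.pyGetD area_datas p.1 []) (q.1 - 1) "" ≠ flower then 1 else 0)
          + (if q.1 = (p.2.length : Int) - 1 ∨ PySem.List.pyGetD (PySem.List.pyGetD area_datas p.1 []) (q.1 + 1) "" ≠ flower then 1 else 0)
      else count) count) 0

-- ===== PORT B =====
-- literal port of Source B: three sum-comprehensions; row[1:]/area_datas[1:] is drop 1
def cacl_rope_count_alt (area_datas : List (List String)) (flower : String) : Int :=
  let flowers : Nat := (area_datas.map (fun row => row.countP (fun cell => cell == flower))).sum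
  let horiz : Nat := (area_datas.map (fun row =>
      (row.zip (row.drop 1)).countP (fun ab => ab.1 == flower && ab.2 == flower))).sum
  let vert : Nat := ((area_datas.zip (area_datas.drop 1)).map (fun rr =>
      (rr.1.zip rr.2).countP (fun ab => ab.1 == flower && ab.2 == flower))).sum
  4 * (flowers : Int) - 2 * ((horiz : Int) + (vert : Int))

-- ===== PRECONDITION & SPEC =====
-- Pre_: every flower cell's vertical neighbour accesses are in range — exactly
-- the inputs on which A returns (elsewhere A raises IndexError on a ragged grid).
def Pre_cacl_rope_count (area_datas : List (List String)) (flower : String) : Prop :=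
  ∀ i, i < area_datas.length → ∀ j, j < (area_datas.getD i []).length →
    (area_datas.getD i []).getD j "" = flower →
    (i = 0 ∨ j < (area_datas.getD (i - 1) []).length) ∧
    (i = area_datas.length - 1 ∨ j < (area_datas.getD (i + 1) []).length)
instance (area_datas : List (List String)) (flower : String) : Decidable (Pre_cacl_rope_count area_datas flower) := by unfold Pre_cacl_rope_count; infer_instance

def pvWitness_cacl_rope_count : List (List String) × String := ([["f", "."], [".", "f"]], "f")

def Spec_cacl_rope_count (area_datas : List (List String)) (flower : String) (out : Int) : Prop := out = cacl_rope_count_alt area_datas flower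
instance (area_datas : List (List String)) (flower : String) (out : Int) : Decidable (Spec_cacl_rope_count area_datas flower out) := by unfold Spec_cacl_rope_count; infer_instance

-- ===== CLAIM (what is proved, stated in full; the proofs are below) =====
def Claim_equal_cacl_rope_count : Prop := ∀ (area_datas : List (List String)) (flower : String), Dom_cacl_rope_count area_datas flower → Pre_cacl_rope_count area_datas flower → Spec_cacl_rope_count area_datas flower (cacl_rope_count area_datas flower)

-- ===== LEMMAS AND PROOFS =====

/-- 0/1 integer indicator of a decidable proposition. -/
def pvInd (P : Prop) [Decidable P] : Int := if P then 1 else 0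

/-- cell (i,j) holds the flower (getD-based, Nat indices). -/
abbrev pvC (area : List (List String)) (fl : String) (i j : Nat) : Prop :=
  (area.getD i []).getD j "" = fl

lemma pvInd_congr {P Q : Prop} [Decidable P] [Decidable Q] (h : P ↔ Q) : pvInd P = pvInd Q := by
  simp [pvInd, h]

lemma pvInd_guard (a b : Prop) [Decidable a] [Decidable b] :
    pvInd (a ∨ ¬ b) = 1 - pvInd (¬ a ∧ b) := by
  by_cases a <;> by_cases b <;> simp [pvInd, *]

lemma sum_map_getD {α M : Type} [AddCommMonoid M] (xs : List α) (d : α) (h : α → M) :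
    (xs.map h).sum = ∑ i ∈ Finset.range xs.length, h (xs.getD i d) := by
  induction xs with
  | nil => simp
  | cons x t ih =>
      rw [List.map_cons, List.sum_cons, ih, List.length_cons, Finset.sum_range_succ']
      simp [add_comm]

lemma countP_int {α : Type} (xs : List α) (d : α) (p : α → Bool) :
    ((xs.countP p : Nat) : Int) = ∑ i ∈ Finset.range xs.length, pvInd (p (xs.getD i d) = true) := by
  induction xs with
  | nil => simp
  | cons x t ih =>
      rw [List.countP_cons, List.length_cons, Finset.sum_range_succ']
      push_cast [ih]
      simp [pvInd]

lemma foldl_enum_add {α : Type} (xs : List α) (d : α) (g : Int → α → Int) (s a : Int) :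
    (PySem.List.enumerate xs s).foldl (fun acc p => acc + g p.1 p.2) a
      = a + ∑ i ∈ Finset.range xs.length, g (s + (i : Int)) (xs.getD i d) := by
  induction xs generalizing s a with
  | nil => simp [PySem.List.enumerate_nil]
  | cons x t ih =>
      rw [PySem.List.enumerate_cons, List.foldl_cons, ih, List.length_cons,
        Finset.sum_range_succ']
      have hs : ∑ i ∈ Finset.range t.length, g (s + 1 + (i : Int)) (t.getD i d)
          = ∑ i ∈ Finset.range t.length, g (s + ((i : Nat) + 1 : Nat)) ((x :: t).getD (i + 1) d) := by
        refine Finset.sum_congr rfl (fun i _ => ?_)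
        rw [List.getD_cons_succ]
        congr 1
        push_cast
        ring
      rw [hs]
      simp
      ring

lemma sum_range_shift (m : Nat) (f : Nat → Int) (h0 : m ≠ 0 → f 0 = 0) :
    ∑ i ∈ Finset.range m, f i = ∑ i ∈ Finset.range (m - 1), f (i + 1) := by
  cases m with
  | zero => simp
  | succ k => rw [Finset.sum_range_succ', h0 (by omega)]; simp

lemma sum_range_truncate (m k : Nat) (hk : k ≤ m) (f : Nat → Int)
    (hz : ∀ i, k ≤ i → i < m → f i = 0) :
    ∑ i ∈ Finset.range m, f i = ∑ i ∈ Finset.range k, f i := by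
  refine (Finset.sum_subset ?_ ?_).symm
  · intro x hx; exact Finset.mem_range.2 (lt_of_lt_of_le (Finset.mem_range.1 hx) hk)
  · intro i hi hni
    exact hz i (by simpa using hni) (by simpa using hi)


/-- A's per-cell contribution, Int indices and pyGetD exactly as in the port. -/
def pvQ (area : List (List String)) (flower : String) (i : Int) (row : List String)
    (j : Int) (cell : String) : Int :=
  if cell = flower then
      (if i = 0 ∨ PySem.List.pyGetD (PySem.List.pyGetD area (i - 1) []) j "" ≠ flower then 1 else 0)
    + (if i = (area.length : Int) - 1 ∨ PySem.List.pyGetD (PySem.List.pyGetD area (i + 1) []) j "" ≠ flower then 1 else 0)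
    + (if j = 0 ∨ PySem.List.pyGetD (PySem.List.pyGetD area i []) (j - 1) "" ≠ flower then 1 else 0)
    + (if j = (row.length : Int) - 1 ∨ PySem.List.pyGetD (PySem.List.pyGetD area i []) (j + 1) "" ≠ flower then 1 else 0)
  else 0

lemma A_as_sum (area : List (List String)) (flower : String) :
    cacl_rope_count area flower
      = ∑ i ∈ Finset.range area.length, ∑ j ∈ Finset.range ((area.getD i []).length),
          pvQ area flower (i : Int) (area.getD i []) (j : Int) ((area.getD i []).getD j "") := by
  unfold cacl_rope_count
  have h1 : (PySem.List.enumerate area 0).foldl (fun count p =>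
      (PySem.List.enumerate p.2 0).foldl (fun count q =>
        if q.2 = flower then
          count
            + (if p.1 = 0 ∨ PySem.List.pyGetD (PySem.List.pyGetD area (p.1 - 1) []) q.1 "" ≠ flower then 1 else 0)
            + (if p.1 = (area.length : Int) - 1 ∨ PySem.List.pyGetD (PySem.List.pyGetD area (p.1 + 1) []) q.1 "" ≠ flower then 1 else 0)
            + (if q.1 = 0 ∨ PySem.List.pyGetD (PySem.List.pyGetD area p.1 []) (q.1 - 1) "" ≠ flower then 1 else 0)
            + (if q.1 = (p.2.length : Int) - 1 ∨ PySem.List.pyGetD (PySem.List.pyGetD area p.1 []) (q.1 + 1) "" ≠ flower then 1 else 0)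
        else count) count) 0
      = (PySem.List.enumerate area 0).foldl (fun count p =>
          count + ∑ j ∈ Finset.range p.2.length,
            pvQ area flower p.1 p.2 (j : Int) (p.2.getD j "")) 0 := by
    apply PySem.List.foldl_congr_mem'
    intro p _ acc
    have h2 : (PySem.List.enumerate p.2 0).foldl (fun count q =>
        if q.2 = flower then
          count
            + (if p.1 = 0 ∨ PySem.List.pyGetD (PySem.List.pyGetD area (p.1 - 1) []) q.1 "" ≠ flower then 1 else 0)
            + (if p.1 = (area.length : Int) - 1 ∨ PySem.List.pyGetD (PySem.List.pyGetD area (p.1 + 1) []) q.1 "" ≠ flower then 1 else 0)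
            + (if q.1 = 0 ∨ PySem.List.pyGetD (PySem.List.pyGetD area p.1 []) (q.1 - 1) "" ≠ flower then 1 else 0)
            + (if q.1 = (p.2.length : Int) - 1 ∨ PySem.List.pyGetD (PySem.List.pyGetD area p.1 []) (q.1 + 1) "" ≠ flower then 1 else 0)
        else count) acc
        = (PySem.List.enumerate p.2 0).foldl (fun count q =>
            count + pvQ area flower p.1 p.2 q.1 q.2) acc := by
      apply PySem.List.foldl_congr_mem'
      intro q _ acc2
      unfold pvQ
      split_ifs <;> ring
    rw [h2, foldl_enum_add p.2 "" (fun j cell => pvQ area flower p.1 p.2 j cell) 0 acc]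
    simp
  rw [h1, foldl_enum_add area []
    (fun i row => ∑ j ∈ Finset.range row.length, pvQ area flower i row (j : Int) (row.getD j "")) 0 0]
  simp

lemma cell_convert (area : List (List String)) (flower : String) (i j : Nat)
    (hi : i < area.length) (hj : j < (area.getD i []).length) :
    pvQ area flower (i : Int) (area.getD i []) (j : Int) ((area.getD i []).getD j "")
      = 4 * pvInd (pvC area flower i j)
        - pvInd (pvC area flower i j ∧ i ≠ 0 ∧ pvC area flower (i - 1) j)
        - pvInd (pvC area flower i j ∧ i ≠ area.length - 1 ∧ pvC area flower (i + 1) j)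
        - pvInd (pvC area flower i j ∧ j ≠ 0 ∧ pvC area flower i (j - 1))
        - pvInd (pvC area flower i j ∧ j ≠ (area.getD i []).length - 1 ∧ pvC area flower i (j + 1)) := by
  by_cases hc : pvC area flower i j
  · rw [pvQ, if_pos hc]
    have e1 : (if (i : Int) = 0 ∨ PySem.List.pyGetD (PySem.List.pyGetD area ((i : Int) - 1) []) (j : Int) "" ≠ flower then (1:Int) else 0)
        = 1 - pvInd (i ≠ 0 ∧ pvC area flower (i - 1) j) := by
      by_cases hi0 : i = 0
      · subst hi0; simp [pvInd]
      · rw [show ((i : Int) - 1) = (((i - 1 : Nat)) : Int) by omega]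
        simp only [PySem.List.pyGetD_natCast]
        rw [show (if (i : Int) = 0 ∨ ¬(area.getD (i-1) []).getD j "" = flower then (1:Int) else 0)
              = pvInd ((i : Int) = 0 ∨ ¬ pvC area flower (i-1) j) from rfl,
            pvInd_guard]
        congr 1
        exact pvInd_congr (by simp [hi0])
    have e2 : (if (i : Int) = (area.length : Int) - 1 ∨ PySem.List.pyGetD (PySem.List.pyGetD area ((i : Int) + 1) []) (j : Int) "" ≠ flower then (1:Int) else 0)
        = 1 - pvInd (i ≠ area.length - 1 ∧ pvC area flower (i + 1) j) := by
      by_cases hil : i = area.length - 1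
      · rw [if_pos (Or.inl (show (i : Int) = (area.length : Int) - 1 by omega))]
        simp [pvInd, hil]
      · rw [show ((i : Int) + 1) = (((i + 1 : Nat)) : Int) by omega]
        simp only [PySem.List.pyGetD_natCast]
        rw [show (if (i : Int) = (area.length : Int) - 1 ∨ ¬(area.getD (i+1) []).getD j "" = flower then (1:Int) else 0)
              = pvInd ((i : Int) = (area.length : Int) - 1 ∨ ¬ pvC area flower (i+1) j) from rfl,
            pvInd_guard]
        congr 1
        exact pvInd_congr (by constructor <;> rintro ⟨h1, h2⟩ <;> exact ⟨by omega, h2⟩)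
    have e3 : (if (j : Int) = 0 ∨ PySem.List.pyGetD (PySem.List.pyGetD area (i : Int) []) ((j : Int) - 1) "" ≠ flower then (1:Int) else 0)
        = 1 - pvInd (j ≠ 0 ∧ pvC area flower i (j - 1)) := by
      by_cases hj0 : j = 0
      · subst hj0; simp [pvInd]
      · rw [show ((j : Int) - 1) = (((j - 1 : Nat)) : Int) by omega]
        simp only [PySem.List.pyGetD_natCast]
        rw [show (if (j : Int) = 0 ∨ ¬(area.getD i []).getD (j-1) "" = flower then (1:Int) else 0)
              = pvInd ((j : Int) = 0 ∨ ¬ pvC area flower i (j-1)) from rfl,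
            pvInd_guard]
        congr 1
        exact pvInd_congr (by simp [hj0])
    have e4 : (if (j : Int) = ((area.getD i []).length : Int) - 1 ∨ PySem.List.pyGetD (PySem.List.pyGetD area (i : Int) []) ((j : Int) + 1) "" ≠ flower then (1:Int) else 0)
        = 1 - pvInd (j ≠ (area.getD i []).length - 1 ∧ pvC area flower i (j + 1)) := by
      by_cases hjl : j = (area.getD i []).length - 1
      · rw [if_pos (Or.inl (show (j : Int) = ((area.getD i []).length : Int) - 1 by omega))]
        simp [pvInd, hjl]
      · rw [show ((j : Int) + 1) = (((j + 1 : Nat)) : Int) by omega]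
        simp only [PySem.List.pyGetD_natCast]
        rw [show (if (j : Int) = ((area.getD i []).length : Int) - 1 ∨ ¬(area.getD i []).getD (j+1) "" = flower then (1:Int) else 0)
              = pvInd ((j : Int) = ((area.getD i []).length : Int) - 1 ∨ ¬ pvC area flower i (j+1)) from rfl,
            pvInd_guard]
        congr 1
        exact pvInd_congr (by constructor <;> rintro ⟨h1, h2⟩ <;> exact ⟨by omega, h2⟩)
    rw [e1, e2, e3, e4,
      pvInd_congr (and_iff_right hc) , pvInd_congr (and_iff_right hc),
      pvInd_congr (and_iff_right hc), pvInd_congr (and_iff_right hc),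
      show pvInd (pvC area flower i j) = 1 from by unfold pvInd; rw [if_pos hc]]
    ring
  · rw [pvQ, if_neg hc]
    simp [pvInd, hc]


lemma sum_map_nat_int {α : Type} (xs : List α) (d : α) (h : α → Nat) :
    (((xs.map h).sum : Nat) : Int) = ∑ i ∈ Finset.range xs.length, ((h (xs.getD i d) : Nat) : Int) := by
  rw [sum_map_getD xs d h]
  push_cast
  rfl

lemma countP_zip_int {α : Type} (r1 r2 : List α) (d : α) (p : α × α → Bool) :
    (((r1.zip r2).countP p : Nat) : Int)
      = ∑ j ∈ Finset.range (min r1.length r2.length), pvInd (p (r1.getD j d, r2.getD j d) = true) := by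
  rw [countP_int (r1.zip r2) (d, d) p, List.length_zip]
  refine Finset.sum_congr rfl (fun j hj => ?_)
  have hj' := Finset.mem_range.1 hj
  have h1 : j < (r1.zip r2).length := by rw [List.length_zip]; omega
  rw [List.getD_eq_getElem _ _ h1, List.getElem_zip,
    List.getD_eq_getElem r1 d (by omega), List.getD_eq_getElem r2 d (by omega)]

lemma B_as_sum (area : List (List String)) (flower : String) :
    cacl_rope_count_alt area flower
      = 4 * (∑ i ∈ Finset.range area.length, ∑ j ∈ Finset.range ((area.getD i []).length),
              pvInd (pvC area flower i j))
        - 2 * ((∑ i ∈ Finset.range area.length, ∑ j ∈ Finset.range ((area.getD i []).length - 1),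
                  pvInd (pvC area flower i j ∧ pvC area flower i (j + 1)))
             + (∑ i ∈ Finset.range (area.length - 1),
                  ∑ j ∈ Finset.range (min ((area.getD i []).length) ((area.getD (i + 1) []).length)),
                  pvInd (pvC area flower i j ∧ pvC area flower (i + 1) j))) := by
  have hdef : cacl_rope_count_alt area flower
      = 4 * (((area.map (fun row => row.countP (fun cell => cell == flower))).sum : Nat) : Int)
        - 2 * ((((area.map (fun row =>
              (row.zip (row.drop 1)).countP (fun ab => ab.1 == flower && ab.2 == flower))).sum : Nat) : Int)
             + ((((area.zip (area.drop 1)).map (fun rr =>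
              (rr.1.zip rr.2).countP (fun ab => ab.1 == flower && ab.2 == flower))).sum : Nat) : Int)) := rfl
  have hF : (((area.map (fun row => row.countP (fun cell => cell == flower))).sum : Nat) : Int)
      = ∑ i ∈ Finset.range area.length, ∑ j ∈ Finset.range ((area.getD i []).length),
          pvInd (pvC area flower i j) := by
    rw [sum_map_nat_int area [] _]
    refine Finset.sum_congr rfl (fun i _ => ?_)
    rw [countP_int _ ""]
    exact Finset.sum_congr rfl (fun j _ => pvInd_congr (by simp [pvC, List.getD_eq_getElem?_getD]))
  have hH : (((area.map (fun row =>
        (row.zip (row.drop 1)).countP (fun ab => ab.1 == flower && ab.2 == flower))).sum : Nat) : Int)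
      = ∑ i ∈ Finset.range area.length, ∑ j ∈ Finset.range ((area.getD i []).length - 1),
          pvInd (pvC area flower i j ∧ pvC area flower i (j + 1)) := by
    rw [sum_map_nat_int area [] _]
    refine Finset.sum_congr rfl (fun i _ => ?_)
    rw [countP_zip_int _ _ "", List.length_drop,
      show min ((area.getD i []).length) ((area.getD i []).length - 1)
        = (area.getD i []).length - 1 from by omega]
    refine Finset.sum_congr rfl (fun j hj => ?_)
    exact pvInd_congr (by simp [pvC, List.getD_eq_getElem?_getD])
  have hV : ((((area.zip (area.drop 1)).map (fun rr =>
        (rr.1.zip rr.2).countP (fun ab => ab.1 == flower && ab.2 == flower))).sum : Nat) : Int)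
      = ∑ i ∈ Finset.range (area.length - 1),
          ∑ j ∈ Finset.range (min ((area.getD i []).length) ((area.getD (i + 1) []).length)),
          pvInd (pvC area flower i j ∧ pvC area flower (i + 1) j) := by
    rw [sum_map_nat_int _ ([], []) _, List.length_zip, List.length_drop,
      show min area.length (area.length - 1) = area.length - 1 from by omega]
    refine Finset.sum_congr rfl (fun i hi => ?_)
    have hi' := Finset.mem_range.1 hi
    have h1 : i < (area.zip (area.drop 1)).length := by
      rw [List.length_zip, List.length_drop]; omega
    have hz : (area.zip (area.drop 1)).getD i ([], [])
        = (area.getD i [], area.getD (i + 1) []) := by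
      rw [List.getD_eq_getElem _ _ h1, List.getElem_zip]
      refine Prod.ext ?_ ?_
      · exact (List.getD_eq_getElem _ _ (by omega : i < area.length)).symm
      · rw [List.getElem_drop, List.getD_eq_getElem _ _ (by omega : i + 1 < area.length)]
        have h3 : 1 + i = i + 1 := by omega
        simp [h3]
    rw [hz, countP_zip_int _ _ ""]
    exact Finset.sum_congr rfl (fun j _ => pvInd_congr (by simp [pvC, List.getD_eq_getElem?_getD]))
  rw [hdef, hF, hH, hV]

theorem A_eq_B (area : List (List String)) (flower : String)
    (hpre : Pre_cacl_rope_count area flower) :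
    cacl_rope_count area flower = cacl_rope_count_alt area flower := by
  rw [A_as_sum, B_as_sum]
  have hcell : (∑ i ∈ Finset.range area.length, ∑ j ∈ Finset.range ((area.getD i []).length),
        pvQ area flower (i : Int) (area.getD i []) (j : Int) ((area.getD i []).getD j ""))
      = ∑ i ∈ Finset.range area.length, ∑ j ∈ Finset.range ((area.getD i []).length),
          (4 * pvInd (pvC area flower i j)
            - pvInd (pvC area flower i j ∧ i ≠ 0 ∧ pvC area flower (i - 1) j)
            - pvInd (pvC area flower i j ∧ i ≠ area.length - 1 ∧ pvC area flower (i + 1) j)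
            - pvInd (pvC area flower i j ∧ j ≠ 0 ∧ pvC area flower i (j - 1))
            - pvInd (pvC area flower i j ∧ j ≠ (area.getD i []).length - 1 ∧ pvC area flower i (j + 1))) :=
    Finset.sum_congr rfl (fun i hi => Finset.sum_congr rfl (fun j hj =>
      cell_convert area flower i j (Finset.mem_range.1 hi) (Finset.mem_range.1 hj)))
  rw [hcell]
  simp only [Finset.sum_sub_distrib, ← Finset.mul_sum]
  have hU : (∑ i ∈ Finset.range area.length, ∑ j ∈ Finset.range ((area.getD i []).length),
        pvInd (pvC area flower i j ∧ i ≠ 0 ∧ pvC area flower (i - 1) j))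
      = ∑ i ∈ Finset.range (area.length - 1),
          ∑ j ∈ Finset.range (min ((area.getD i []).length) ((area.getD (i + 1) []).length)),
          pvInd (pvC area flower i j ∧ pvC area flower (i + 1) j) := by
    rw [sum_range_shift area.length _
      (fun _ => Finset.sum_eq_zero (fun j _ => by simp [pvInd]))]
    refine Finset.sum_congr rfl (fun i hi => ?_)
    have hi' := Finset.mem_range.1 hi
    have hz : ∀ j, min ((area.getD i []).length) ((area.getD (i + 1) []).length) ≤ j →
        j < (area.getD (i + 1) []).length →
        pvInd (pvC area flower (i + 1) j ∧ i + 1 ≠ 0 ∧ pvC area flower (i + 1 - 1) j) = 0 := by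
      intro j hj1 hj2
      by_cases hc : pvC area flower (i + 1) j
      · have h2 := (hpre (i + 1) (by omega) j hj2 hc).1
        have hlt : j < (area.getD i []).length := by
          rcases h2 with h | h
          · exact absurd h (by omega)
          · simpa using h
        exact ((by omega : False)).elim
      · simp [pvInd, hc]
    rw [sum_range_truncate ((area.getD (i + 1) []).length)
      (min ((area.getD i []).length) ((area.getD (i + 1) []).length)) (by omega) _ hz]
    refine Finset.sum_congr rfl (fun j _ => ?_)
    refine pvInd_congr ?_
    rw [Nat.add_sub_cancel]
    constructor
    · rintro ⟨a, _, b⟩; exact ⟨b, a⟩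
    · rintro ⟨a, b⟩; exact ⟨b, by omega, a⟩
  have hD : (∑ i ∈ Finset.range area.length, ∑ j ∈ Finset.range ((area.getD i []).length),
        pvInd (pvC area flower i j ∧ i ≠ area.length - 1 ∧ pvC area flower (i + 1) j))
      = ∑ i ∈ Finset.range (area.length - 1),
          ∑ j ∈ Finset.range (min ((area.getD i []).length) ((area.getD (i + 1) []).length)),
          pvInd (pvC area flower i j ∧ pvC area flower (i + 1) j) := by
    rw [sum_range_truncate area.length (area.length - 1) (by omega) _
      (fun i hi1 hi2 => Finset.sum_eq_zero (fun j _ => by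
        have hieq : i = area.length - 1 := by omega
        simp [pvInd, hieq]))]
    refine Finset.sum_congr rfl (fun i hi => ?_)
    have hi' := Finset.mem_range.1 hi
    have hz : ∀ j, min ((area.getD i []).length) ((area.getD (i + 1) []).length) ≤ j →
        j < (area.getD i []).length →
        pvInd (pvC area flower i j ∧ i ≠ area.length - 1 ∧ pvC area flower (i + 1) j) = 0 := by
      intro j hj1 hj2
      by_cases hc : pvC area flower i j
      · have h2 := (hpre i (by omega) j hj2 hc).2
        have hlt : j < (area.getD (i + 1) []).length := by
          rcases h2 with h | h
          · exact absurd h (by omega)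
          · exact h
        exact ((by omega : False)).elim
      · simp [pvInd, hc]
    rw [sum_range_truncate ((area.getD i []).length)
      (min ((area.getD i []).length) ((area.getD (i + 1) []).length)) (by omega) _ hz]
    refine Finset.sum_congr rfl (fun j _ => ?_)
    refine pvInd_congr ?_
    constructor
    · rintro ⟨a, _, b⟩; exact ⟨a, b⟩
    · rintro ⟨a, b⟩; exact ⟨a, by omega, b⟩
  have hL : (∑ i ∈ Finset.range area.length, ∑ j ∈ Finset.range ((area.getD i []).length),
        pvInd (pvC area flower i j ∧ j ≠ 0 ∧ pvC area flower i (j - 1)))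
      = ∑ i ∈ Finset.range area.length, ∑ j ∈ Finset.range ((area.getD i []).length - 1),
          pvInd (pvC area flower i j ∧ pvC area flower i (j + 1)) := by
    refine Finset.sum_congr rfl (fun i _ => ?_)
    rw [sum_range_shift ((area.getD i []).length) _ (fun _ => by simp [pvInd])]
    refine Finset.sum_congr rfl (fun j _ => ?_)
    refine pvInd_congr ?_
    rw [Nat.add_sub_cancel]
    constructor
    · rintro ⟨a, _, b⟩; exact ⟨b, a⟩
    · rintro ⟨a, b⟩; exact ⟨b, by omega, a⟩
  have hR : (∑ i ∈ Finset.range area.length, ∑ j ∈ Finset.range ((area.getD i []).length),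
        pvInd (pvC area flower i j ∧ j ≠ (area.getD i []).length - 1 ∧ pvC area flower i (j + 1)))
      = ∑ i ∈ Finset.range area.length, ∑ j ∈ Finset.range ((area.getD i []).length - 1),
          pvInd (pvC area flower i j ∧ pvC area flower i (j + 1)) := by
    refine Finset.sum_congr rfl (fun i _ => ?_)
    rw [sum_range_truncate ((area.getD i []).length) ((area.getD i []).length - 1) (by omega) _
      (fun j hj1 hj2 => by
        have hjeq : j = (area.getD i []).length - 1 := by omega
        simp [pvInd, hjeq])]
    refine Finset.sum_congr rfl (fun j hj => ?_)
    have hj' := Finset.mem_range.1 hj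
    refine pvInd_congr ?_
    constructor
    · rintro ⟨a, _, b⟩; exact ⟨a, b⟩
    · rintro ⟨a, b⟩; exact ⟨a, by omega, b⟩
  rw [hU, hD, hL, hR]
  ring

-- ===== VERDICT (by name: the statement is the Claim_ definition above) =====
theorem cacl_rope_count_spec : Claim_equal_cacl_rope_count := by
  intro area flower _ hpre
  unfold Spec_cacl_rope_count
  exact A_eq_B area flower hpre
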